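-- pv_equiv track=rewrite | github.com/rkham93/python | HangMan/hangman.py | chancesCalculator
-- ===== SOURCE A (Python) =====
-- def chancesCalculator(word):
--     Dict={}
--     room_for_error=3
--     chances=len(word)+room_for_error
--
--     for letter in word:
--         letterCount=word.count(letter)
--         if letterCount>1:
--             Dict[letter]=letterCount
--
--     chances-=sum(list(Dict.values()))
--     return chances
-- ===== SOURCE B (Python) =====
-- def chancesCalculator(word):
--     freq = {}
--     for letter in word:
--         freq[letter] = freq.get(letter, 0) + 1
--     singles = 0
--     for count in freq.values():
--         if count == 1:
--             singles += 1
--     return 3 + singles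
-- ===== Notes on version B (the rewrite author's own statement) =====
-- stated objective: simpler
-- what changed: A subtracts the total count of repeated letters from len(word)+3 after a quadratic pass (word.count inside the loop, collected in a dict); B builds a frequency table in one linear pass and returns 3 plus the number of letters occurring exactly once, using len(word) - sum(counts>1) = number of singletons.
import Mathlib
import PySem

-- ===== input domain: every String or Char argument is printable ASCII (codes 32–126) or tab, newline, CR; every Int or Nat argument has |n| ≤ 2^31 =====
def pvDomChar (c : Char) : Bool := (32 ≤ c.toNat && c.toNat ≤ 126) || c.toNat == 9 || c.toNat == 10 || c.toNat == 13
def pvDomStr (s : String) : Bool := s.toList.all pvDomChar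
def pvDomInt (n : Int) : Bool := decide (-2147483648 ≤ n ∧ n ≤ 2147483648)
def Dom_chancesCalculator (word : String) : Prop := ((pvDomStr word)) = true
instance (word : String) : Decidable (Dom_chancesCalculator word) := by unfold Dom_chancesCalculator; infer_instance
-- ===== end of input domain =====

-- B replaces A's quadratic subtract-the-repeated-counts scheme by one linear frequency pass
-- that returns 3 plus the number of letters occurring exactly once (objective: simpler).

-- ===== PORT A =====
def chancesCalculator (word : String) : Int :=
  let w := word.toList
  let d := w.foldl (fun (d : PySem.Dict Char Int) letter =>
      -- word.count(letter): for a one-character needle Python's str.count is exactly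
      -- the count of that character, ported as List.count over the characters
      let letterCount : Int := (PySem.List.count w letter : Int)
      if letterCount > 1 then d.insert letter letterCount else d) PySem.Dict.empty
  (PySem.Str.len word + 3) - (PySem.Dict.values d).sum

-- ===== PORT B =====
def chancesCalculator_alt (word : String) : Int :=
  let freq := word.toList.foldl
      (fun (d : PySem.Dict Char Int) letter => d.insert letter (d.getD letter 0 + 1))
      PySem.Dict.empty
  let singles := (PySem.Dict.values freq).foldl
      (fun s count => if count == 1 then s + 1 else s) (0 : Int)
  3 + singles

-- ===== PRECONDITION & SPEC =====
def Spec_chancesCalculator (word : String) (out : Int) : Prop := out = chancesCalculator_alt word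
instance (word : String) (out : Int) : Decidable (Spec_chancesCalculator word out) := by unfold Spec_chancesCalculator; infer_instance

-- ===== CLAIM (what is proved, stated in full; the proofs are below) =====
def Claim_equal_chancesCalculator : Prop := ∀ (word : String), Dom_chancesCalculator word → Spec_chancesCalculator word (chancesCalculator word)

-- ===== LEMMAS AND PROOFS =====

-- lookup after a loop of inserts whose value depends only on the key
theorem pv_getD_foldl_insert_fun (v : Char → Int) :
    ∀ (l : List Char) (d : PySem.Dict Char Int) (k : Char),
      (l.foldl (fun d c => d.insert c (v c)) d).getD k 0
        = if k ∈ l then v k else d.getD k 0 := by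
  intro l
  induction l with
  | nil => intro d k; simp
  | cons x t ih =>
    intro d k
    simp only [List.foldl_cons, ih, PySem.Dict.getD_insert, List.mem_cons]
    by_cases hkt : k ∈ t <;> by_cases hkx : k = x <;> simp [hkt, hkx]

-- the arithmetic core: for letters S drawn from w,
-- (Σ counts) + 3 − (Σ counts>1) = 3 + #(count = 1)
theorem pv_main (w : List Char) :
    ∀ S : List Char, (∀ k ∈ S, k ∈ w) →
      (S.map (fun k => (w.count k : Int))).sum + 3
        - ((S.filter (fun k => decide (1 < (w.count k : Int)))).map
            (fun k => (w.count k : Int))).sum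
      = 3 + (((S.map (fun k => (w.count k : Int))).count 1 : Nat) : Int) := by
  intro S
  induction S with
  | nil => intro _; simp
  | cons k t ih =>
    intro h
    have hk : k ∈ w := h k (List.mem_cons_self)
    have hpos : 0 < w.count k := List.count_pos_iff.mpr hk
    have ih' := ih (fun x hx => h x (List.mem_cons_of_mem _ hx))
    by_cases hgt : (1 : Int) < (w.count k : Int)
    · have hne : ((w.count k : Int)) ≠ 1 := by omega
      simp only [List.map_cons, List.sum_cons, List.filter_cons, hgt, decide_true,
        List.count_cons, if_true]
      simp only [beq_iff_eq, hne, if_false]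
      omega
    · have hone : (w.count k : Int) = 1 := by
        have : (1 : Int) ≤ (w.count k : Int) := by exact_mod_cast hpos
        omega
      have hpf : decide (1 < (w.count k : Int)) = false := by simp [hone]
      simp only [List.filter_cons, hpf, Bool.false_eq_true, if_false]
      simp only [List.map_cons, List.sum_cons, List.count_cons, hone,
        beq_self_eq_true, if_true]
      omega

-- Σ over the distinct letters of their counts = length of the word
theorem pv_sum_counts (w : List Char) :
    ((PySem.Set.ofList w).map (fun k => (w.count k : Int))).sum = (w.length : Int) := by
  have hperm : (PySem.Set.ofList w).Perm w.dedup := by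
    rw [List.perm_ext_iff_of_nodup (PySem.Set.nodup_ofList w) w.nodup_dedup]
    intro a
    rw [PySem.Set.mem_ofList, List.mem_dedup]
  rw [(hperm.map (fun k => (w.count k : Int))).sum_eq]
  have hnat : (w.dedup.map fun x => w.count x).sum = w.length :=
    List.sum_map_count_dedup_eq_length w
  have hcast : ((w.dedup.map fun x => w.count x).sum : Int) = (w.length : Int) := by
    exact_mod_cast congrArg (Nat.cast : Nat → Int) hnat
  rw [← hcast]
  push_cast
  rw [List.map_map]
  rfl

-- A's dict values sum = Σ over distinct repeated letters of their counts
theorem pv_a_values (w : List Char) :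
    (PySem.Dict.values ((w.filter (fun k => decide (1 < (w.count k : Int)))).foldl
        (fun (d : PySem.Dict Char Int) c => d.insert c ((w.count c : Int))) PySem.Dict.empty)).sum
    = (((PySem.Set.ofList w).filter (fun k => decide (1 < (w.count k : Int)))).map
        (fun k => (w.count k : Int))).sum := by
  set p : Char → Bool := fun k => decide (1 < (w.count k : Int)) with hp
  set v : Char → Int := fun k => (w.count k : Int) with hv
  set d := (w.filter p).foldl (fun (d : PySem.Dict Char Int) c => d.insert c (v c)) PySem.Dict.empty with hd
  have hnd : d.keys.Nodup := by
    apply PySem.Dict.nodup_keys_foldl_insert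
    simp
  have hkeys : d.keys = PySem.Set.ofList (w.filter p) := by
    rw [hd, PySem.Dict.keys_foldl_insert]
    simp [PySem.Dict.keys_empty, PySem.Set.update, PySem.Set.ofList_eq_foldl]
  have hvals : d.values = d.keys.map (fun k => d.getD k 0) :=
    PySem.Dict.values_eq_map_keys d hnd 0
  have hgetD : ∀ k ∈ d.keys, d.getD k 0 = v k := by
    intro k hkmem
    rw [hd, pv_getD_foldl_insert_fun]
    rw [hkeys, PySem.Set.mem_ofList] at hkmem
    simp [hkmem]
  rw [hvals, List.map_congr_left hgetD, hkeys]
  -- both index lists are nodup with the same membership, hence permutations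
  have hperm : (PySem.Set.ofList (w.filter p)).Perm ((PySem.Set.ofList w).filter p) := by
    rw [List.perm_ext_iff_of_nodup (PySem.Set.nodup_ofList _)
      ((PySem.Set.nodup_ofList w).filter p)]
    intro a
    rw [PySem.Set.mem_ofList, List.mem_filter, List.mem_filter, PySem.Set.mem_ofList]
  exact (hperm.map v).sum_eq

-- B's singles counter counts the distinct letters of count 1
theorem pv_b_eq (word : String) :
    chancesCalculator_alt word
      = 3 + ((((PySem.Set.ofList word.toList).map
          (fun k => (word.toList.count k : Int))).count 1 : Nat) : Int) := by
  unfold chancesCalculator_alt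
  dsimp only
  rw [PySem.Dict.foldl_insert_getD_add_one_eq_counter]
  rw [PySem.List.foldl_beq_add_one]
  have hval : (PySem.Dict.counter word.toList).values
      = (PySem.Set.ofList word.toList).map (fun k => (word.toList.count k : Int)) := by
    show ((PySem.Dict.counter word.toList).items).map (·.2) = _
    rw [PySem.Dict.items_counter, List.map_map]
    rfl
  rw [hval]
  omega

-- ===== VERDICT (by name: the statement is the Claim_ definition above) =====
theorem chancesCalculator_spec : Claim_equal_chancesCalculator := by
  intro word _
  unfold Spec_chancesCalculator
  rw [pv_b_eq]
  unfold chancesCalculator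
  dsimp only
  simp only [PySem.List.count_eq, gt_iff_lt]
  rw [PySem.List.foldl_ite_eq_foldl_filter
    (p := fun c => (1 : Int) < (word.toList.count c : Int))]
  rw [pv_a_values word.toList]
  rw [PySem.Str.len_eq, ← pv_sum_counts word.toList]
  exact pv_main word.toList (PySem.Set.ofList word.toList)
    (fun k hk => (PySem.Set.mem_ofList _ _).mp hk)
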